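-- pv_equiv track=rewrite | github.com/lagsmana13/alx-higher_level_programming | 0x01-python-if_else_loops_functions/101-remove_char_at.py | custom_remove_char_at
-- ===== SOURCE A (Python) =====
-- def custom_remove_char_at(string, index):
--     new_string = ""
--     for i in range(len(string)):
--         if i == index:
--             continue
--         else:
--             new_string += string[i]
--     return new_string
-- ===== SOURCE B (Python) =====
-- def custom_remove_char_at(string, index):
--     if index < 0 or index >= len(string):
--         return string
--     return string[:index] + string[index + 1:]
-- ===== Notes on version B (the rewrite author's own statement) =====
-- stated objective: simpler
-- what changed: Replaced the per-character copy loop with a bounds check and a splice of two slices string[:index] + string[index+1:].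
import Mathlib
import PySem

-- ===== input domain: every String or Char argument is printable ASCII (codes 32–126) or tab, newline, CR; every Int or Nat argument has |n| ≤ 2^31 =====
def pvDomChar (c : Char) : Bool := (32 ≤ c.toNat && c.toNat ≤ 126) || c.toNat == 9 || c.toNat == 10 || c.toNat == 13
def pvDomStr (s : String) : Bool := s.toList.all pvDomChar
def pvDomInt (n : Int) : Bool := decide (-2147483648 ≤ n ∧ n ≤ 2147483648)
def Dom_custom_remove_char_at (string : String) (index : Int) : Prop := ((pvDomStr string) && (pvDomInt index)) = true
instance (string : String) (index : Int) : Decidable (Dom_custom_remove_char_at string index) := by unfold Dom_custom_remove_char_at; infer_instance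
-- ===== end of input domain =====

-- B replaces A's per-character copy loop by a bounds check plus a splice of two slices (simpler).

-- ===== PORT A =====
-- new_string = ""; for i in range(len(string)): if i == index: continue; else: new_string += string[i]
def custom_remove_char_at (string : String) (index : Int) : String :=
  String.ofList
    ((PySem.List.pyRange 0 (string.toList.length : Int) 1).foldl
      (fun acc i =>
        if i = index then acc
        else acc ++ ((PySem.List.pyGet? string.toList i).elim [] (fun c => [c])))
      [])

-- ===== PORT B =====
-- if index < 0 or index >= len(string): return string; return string[:index] + string[index+1:]
def custom_remove_char_at_alt (string : String) (index : Int) : String :=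
  if index < 0 || (string.toList.length : Int) ≤ index then string
  else String.ofList (PySem.List.slice string.toList none (some index) ++
                  PySem.List.slice string.toList (some (index + 1)) none)

-- ===== PRECONDITION & SPEC =====
def Spec_custom_remove_char_at (string : String) (index : Int) (out : String) : Prop := out = custom_remove_char_at_alt string index
instance (string : String) (index : Int) (out : String) : Decidable (Spec_custom_remove_char_at string index out) := by unfold Spec_custom_remove_char_at; infer_instance

-- ===== CLAIM (what is proved, stated in full; the proofs are below) =====
def Claim_equal_custom_remove_char_at : Prop := ∀ (string : String) (index : Int), Dom_custom_remove_char_at string index → Spec_custom_remove_char_at string index (custom_remove_char_at string index)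

-- ===== LEMMAS AND PROOFS =====

-- On a segment [a, b) of indices that misses `index`, A's loop body appends exactly
-- the corresponding slice of the character list.
theorem pvSeg (l : List Char) (index : Int) (a b : Nat) (hb : b ≤ l.length)
    (hskip : ∀ i : Int, (a : Int) ≤ i → i < (b : Int) → i ≠ index) (acc : List Char) :
    (PySem.List.pyRange (a : Int) (b : Int) 1).foldl
      (fun acc i =>
        if i = index then acc
        else acc ++ ((PySem.List.pyGet? l i).elim [] (fun c => [c])))
      acc
    = acc ++ (l.take b).drop a := by
  induction b generalizing acc with
  | zero =>
    rw [PySem.List.pyRange_one_eq_nil (by exact_mod_cast Nat.zero_le a)]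
    simp
  | succ b ih =>
    by_cases hab : a ≤ b
    · have hsplit : ((b : Int) + 1) = ((b + 1 : Nat) : Int) := by push_cast; ring
      rw [← hsplit, PySem.List.pyRange_one_succ_right (by exact_mod_cast hab), List.foldl_append]
      rw [ih (by omega) (fun i h1 h2 => hskip i h1 (by omega))]
      have hbl : b < l.length := by omega
      have hne : (b : Int) ≠ index := hskip b (by exact_mod_cast hab) (by omega)
      simp only [List.foldl_cons, List.foldl_nil, if_neg hne]
      have hget : PySem.List.pyGet? l (b : Int) = some l[b] := by
        simp [PySem.List.pyGet?_natCast, List.getElem?_eq_getElem hbl]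
      rw [hget]
      have htake : l.take (b + 1) = l.take b ++ [l[b]] := by
        rw [List.take_add_one, List.getElem?_eq_getElem hbl]; rfl
      rw [htake, List.drop_append_of_le_length (by simp [hbl.le]; omega)]
      simp
    · rw [PySem.List.pyRange_one_eq_nil (by exact_mod_cast Nat.succ_le_of_lt (by omega))]
      have : (l.take (b + 1)).drop a = [] := by
        apply List.drop_eq_nil_of_le; simp; omega
      simp [this]

-- ===== VERDICT (by name: the statement is the Claim_ definition above) =====
theorem custom_remove_char_at_spec : Claim_equal_custom_remove_char_at := by
  intro string index _
  unfold Spec_custom_remove_char_at custom_remove_char_at custom_remove_char_at_alt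
  set l := string.toList with hl
  by_cases hout : index < 0 ∨ (l.length : Int) ≤ index
  · -- out of range: the loop copies every character
    have hskip : ∀ i : Int, (0 : Int) ≤ i → i < (l.length : Int) → i ≠ index := by
      rintro i h1 h2 rfl; omega
    have := pvSeg l index 0 l.length le_rfl (by exact_mod_cast hskip) []
    simp only [Nat.cast_zero] at this
    rw [this]
    rw [if_pos (by simp only [Bool.or_eq_true, decide_eq_true_eq]; omega)]
    simp only [List.nil_append, List.drop_zero, List.take_length, hl]
    exact String.ofList_toList
  · rw [not_or, not_lt, not_le] at hout
    obtain ⟨h0, hlt⟩ := hout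
    rw [if_neg (by simp only [Bool.or_eq_true, decide_eq_true_eq]; omega)]
    set k := index.toNat with hk
    have hik : index = (k : Int) := by omega
    have hkl : k < l.length := by omega
    have hsplit1 : PySem.List.pyRange 0 (l.length : Int) 1 =
        PySem.List.pyRange 0 (k : Int) 1 ++ PySem.List.pyRange (k : Int) (l.length : Int) 1 :=
      PySem.List.pyRange_one_append 0 (k : Int) (l.length : Int) (by omega) (by exact_mod_cast hkl.le)
    have hsplit2 : PySem.List.pyRange (k : Int) (l.length : Int) 1 =
        (k : Int) :: PySem.List.pyRange ((k : Int) + 1) (l.length : Int) 1 :=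
      PySem.List.pyRange_one_cons (by exact_mod_cast hkl)
    rw [hsplit1, List.foldl_append]
    have h1 := pvSeg l index 0 k hkl.le (by intro i hi1 hi2; omega) []
    simp only [Nat.cast_zero] at h1
    rw [h1, hsplit2]
    simp only [List.foldl_cons, if_pos hik.symm]
    have h2 := pvSeg l index (k + 1) l.length le_rfl (by intro i hi1 hi2; push_cast at hi1; omega)
      ([] ++ (l.take k).drop 0)
    push_cast at h2
    rw [h2]
    rw [PySem.List.slice_to l (by omega), PySem.List.slice_from l (by omega)]
    have : (index + 1).toNat = k + 1 := by omega
    simp [this, hk, List.take_of_length_le (le_refl l.length) ]
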